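-- pv_equiv track=rewrite | github.com/TridentifyIshaan/TridentifyIshaan | now-building-block-updater/src/now_building_updater/generator.py | _recent_months
-- ===== SOURCE A (Python) =====
-- from typing import Dict, List, Sequence, Tuple
--
-- def _recent_months(year: int, month: int, count: int) -> List[Tuple[int, int]]:
--     pairs: List[Tuple[int, int]] = []
--     y = year
--     m = month
--     for _ in range(count):
--         pairs.append((y, m))
--         m -= 1
--         if m == 0:
--             m = 12
--             y -= 1
--     return pairs
-- ===== SOURCE B (Python) =====
-- def _recent_months(year, month, count):
--     base = year * 12 + (month - 1)
--     return [((base - i) // 12, (base - i) % 12 + 1) for i in range(count)]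
-- ===== Notes on version B (the rewrite author's own statement) =====
-- stated objective: simpler
-- what changed: Replaces the stateful month-decrement-with-wrap loop by a comprehension computing each pair in closed form with floor-divmod on base = year*12 + (month-1); Pre_ excludes inputs with month outside 1..12 whose loop actually runs (count >= 1), where A's wrap-only-at-exactly-0 decrement emits out-of-range month values no closed form would reproduce (for count <= 0 both return []).
-- outside the precondition, e.g. on _recent_months(2020, 13, 2): A returns [(2020, 13), (2020, 12)], B returns [(2021, 1), (2020, 12)]; on _recent_months(2020, 0, 2): A returns [(2020, 0), (2020, -1)], B returns [(2019, 12), (2019, 11)]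
import Mathlib
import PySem

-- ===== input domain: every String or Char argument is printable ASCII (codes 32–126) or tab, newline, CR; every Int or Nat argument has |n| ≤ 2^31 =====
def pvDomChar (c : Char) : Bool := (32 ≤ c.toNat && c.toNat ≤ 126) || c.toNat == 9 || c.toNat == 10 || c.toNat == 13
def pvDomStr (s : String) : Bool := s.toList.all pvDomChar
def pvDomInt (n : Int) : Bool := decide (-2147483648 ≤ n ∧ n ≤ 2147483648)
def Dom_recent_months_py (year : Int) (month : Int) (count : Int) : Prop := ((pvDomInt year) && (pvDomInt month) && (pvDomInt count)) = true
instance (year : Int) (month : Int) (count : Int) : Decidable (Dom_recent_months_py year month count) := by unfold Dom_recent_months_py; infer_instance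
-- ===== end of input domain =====

-- B replaces A's stateful month-decrement-with-wrap loop by a floor-divmod closed form
-- over the running month number base - i — objective: simpler.

-- ===== PORT A =====
def recent_months_py (year : Int) (month : Int) (count : Int) : List (Int × Int) :=
  ((PySem.List.pyRange 0 count 1).foldl
    (fun (st : List (Int × Int) × Int × Int) _ =>
      let pairs := st.1 ++ [(st.2.1, st.2.2)]
      let m := st.2.2 - 1
      if m = 0 then (pairs, st.2.1 - 1, (12 : Int)) else (pairs, st.2.1, m))
    ([], year, month)).1

-- ===== PORT B =====
def recent_months_py_alt (year : Int) (month : Int) (count : Int) : List (Int × Int) :=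
  let base := year * 12 + (month - 1)
  (PySem.List.pyRange 0 count 1).map
    (fun i => (PySem.Int.floordiv (base - i) 12, PySem.Int.mod (base - i) 12 + 1))

-- ===== PRECONDITION & SPEC =====
-- Pre_ excludes inputs whose month lies outside the calendar range 1..12 when the loop actually
-- runs (count ≥ 1): there A's decrement (which wraps only when the month hits exactly 0) emits
-- out-of-range month values, an artefact no closed-form re-implementation would reproduce; for
-- count ≤ 0 both programs return [] whatever the month, so those inputs stay inside the claim.
def Pre_recent_months_py (year : Int) (month : Int) (count : Int) : Prop := (1 ≤ month ∧ month ≤ 12) ∨ count ≤ 0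
instance (year : Int) (month : Int) (count : Int) : Decidable (Pre_recent_months_py year month count) := by unfold Pre_recent_months_py; infer_instance

def pvWitness_recent_months_py : Int × Int × Int := (2024, 5, 3)

def Spec_recent_months_py (year : Int) (month : Int) (count : Int) (out : List (Int × Int)) : Prop := out = recent_months_py_alt year month count
instance (year : Int) (month : Int) (count : Int) (out : List (Int × Int)) : Decidable (Spec_recent_months_py year month count out) := by unfold Spec_recent_months_py; infer_instance

-- ===== CLAIM (what is proved, stated in full; the proofs are below) =====
def Claim_equal_recent_months_py : Prop := ∀ (year : Int) (month : Int) (count : Int), Dom_recent_months_py year month count → Pre_recent_months_py year month count → Spec_recent_months_py year month count (recent_months_py year month count)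

-- ===== LEMMAS AND PROOFS =====

-- Proof-side abbreviations: the divmod pair at month number b, and B's element at index k.
def pvPair (b : Int) : Int × Int := (PySem.Int.floordiv b 12, PySem.Int.mod b 12 + 1)

def pvPairD (base : Int) (k : Nat) : Int × Int := pvPair (base - (k : Int))

-- A's loop as an iterated step on its state (the fold's function ignores the range element).
def pvIterA : Nat → (List (Int × Int) × Int × Int) → (List (Int × Int) × Int × Int)
  | 0, st => st
  | n + 1, st =>
      pvIterA n
        (let pairs := st.1 ++ [(st.2.1, st.2.2)]
         let m := st.2.2 - 1
         if m = 0 then (pairs, st.2.1 - 1, (12 : Int)) else (pairs, st.2.1, m))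

lemma pvFoldl_eq_iterA (l : List Int) (st : List (Int × Int) × Int × Int) :
    l.foldl
      (fun (st : List (Int × Int) × Int × Int) _ =>
        let pairs := st.1 ++ [(st.2.1, st.2.2)]
        let m := st.2.2 - 1
        if m = 0 then (pairs, st.2.1 - 1, (12 : Int)) else (pairs, st.2.1, m))
      st = pvIterA l.length st := by
  induction l generalizing st with
  | nil => rfl
  | cons x xs ih => simp [List.foldl, pvIterA, ih]

lemma pvPair_eq (y m : Int) (h1 : 1 ≤ m) (h2 : m ≤ 12) : pvPair (y * 12 + (m - 1)) = (y, m) := by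
  have hq : PySem.Int.floordiv (y * 12 + (m - 1)) 12 = y := by
    rw [PySem.Int.floordiv_eq_iff_of_pos (by omega)]; omega
  have hm := PySem.Int.floordiv_mul_add_mod (y * 12 + (m - 1)) 12
  rw [hq] at hm
  simp [pvPair]
  omega

lemma pvIterA_spec (n : Nat) : ∀ (acc : List (Int × Int)) (y m : Int), 1 ≤ m → m ≤ 12 →
    (pvIterA n (acc, y, m)).1
      = acc ++ (List.range n).map (pvPairD (y * 12 + (m - 1))) := by
  induction n with
  | zero => intro acc y m _ _; simp [pvIterA]
  | succ n ih =>
    intro acc y m h1 h2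
    rw [List.range_succ_eq_map, List.map_cons, List.map_map]
    have hhead : pvPairD (y * 12 + (m - 1)) 0 = (y, m) := by
      simpa [pvPairD] using pvPair_eq y m h1 h2
    by_cases hm : m - 1 = 0
    · have hm1 : m = 1 := by omega
      subst hm1
      have e : pvIterA (n + 1) (acc, y, 1) = pvIterA n (acc ++ [(y, 1)], y - 1, 12) := by
        simp [pvIterA]
      rw [e, ih (acc ++ [(y, 1)]) (y - 1) 12 (by omega) (by omega)]
      have hmap : (List.range n).map (pvPairD ((y - 1) * 12 + (12 - 1)))
          = (List.range n).map (pvPairD (y * 12 + (1 - 1)) ∘ Nat.succ) := by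
        apply List.map_congr_left
        intro k _
        simp only [pvPairD, Function.comp_apply, Nat.succ_eq_add_one, Nat.cast_add, Nat.cast_one]
        congr 1
        ring
      rw [hmap, hhead]
      simp
    · have e : pvIterA (n + 1) (acc, y, m) = pvIterA n (acc ++ [(y, m)], y, m - 1) := by
        simp [pvIterA, hm]
      rw [e, ih (acc ++ [(y, m)]) y (m - 1) (by omega) (by omega)]
      have hmap : (List.range n).map (pvPairD (y * 12 + (m - 1 - 1)))
          = (List.range n).map (pvPairD (y * 12 + (m - 1)) ∘ Nat.succ) := by
        apply List.map_congr_left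
        intro k _
        simp only [pvPairD, Function.comp_apply, Nat.succ_eq_add_one, Nat.cast_add, Nat.cast_one]
        congr 1
        ring
      rw [hmap, hhead]
      simp

-- ===== VERDICT (by name: the statement is the Claim_ definition above) =====
theorem recent_months_py_spec : Claim_equal_recent_months_py := by
  intro year month count _ hpre
  unfold Spec_recent_months_py recent_months_py recent_months_py_alt
  by_cases hc : count ≤ 0
  · have hnil : PySem.List.pyRange 0 count 1 = [] :=
      PySem.List.pyRange_one_eq_nil hc
    simp [hnil]
  · rcases hpre with hm | hcount
    · rw [pvFoldl_eq_iterA, PySem.List.length_pyRange_one,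
          pvIterA_spec _ _ year month hm.1 hm.2, PySem.List.pyRange_one, List.map_map]
      apply List.map_congr_left
      intro k _
      simp [pvPairD, pvPair]
    · omega
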